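-- pv_equiv track=rewrite | github.com/dvdmarchetti/hackerrank-challenges | Cryptography/Keyword Transposition Chiper/solve.py | build_key_matrix
-- ===== SOURCE A (Python) =====
-- def split(word):
--     return [char for char in word]
--
-- def build_key_matrix(key):
--     key = ''.join(dict.fromkeys(key))
--
--     m = [
--         split(key)
--     ]
--
--     char = ord('A')
--     end = ord('Z')
--     cols = len(key)
--     rows = int((26 - cols) / cols) + 1
--     for r in range(rows):
--         row = []
--
--         for c in range(cols):
--             while chr(char) in key:
--                 char += 1
--
--             if char <= end:
--                 row.append(chr(char))
--                 char += 1
--             else: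
--                 row.append(None)
--
--         m.append(row)
--
--     return ((rows, cols), m)
-- ===== SOURCE B (Python) =====
-- def build_key_matrix(key):
--     key = ''.join(dict.fromkeys(key))
--     cols = len(key)
--     rows = int((26 - cols) / cols) + 1
--     total = rows * cols
--     remaining = [chr(c) for c in range(ord('A'), ord('Z') + 1) if chr(c) not in key]
--     padded = remaining + [None] * (total - len(remaining))
--     body = [padded[i * cols:(i + 1) * cols] for i in range(rows)]
--     return ((rows, cols), [[ch for ch in key]] + body)
-- ===== Notes on version B (the rewrite author's own statement) =====
-- stated objective: simpler
-- what changed: A fills the matrix cell by cell with a cursor that repeatedly skips keyword characters and a past-Z sentinel; B gathers the remaining alphabet letters in one comprehension, pads the list with None to rows*cols, and reshapes it into rows by slicing.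
import Mathlib
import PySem

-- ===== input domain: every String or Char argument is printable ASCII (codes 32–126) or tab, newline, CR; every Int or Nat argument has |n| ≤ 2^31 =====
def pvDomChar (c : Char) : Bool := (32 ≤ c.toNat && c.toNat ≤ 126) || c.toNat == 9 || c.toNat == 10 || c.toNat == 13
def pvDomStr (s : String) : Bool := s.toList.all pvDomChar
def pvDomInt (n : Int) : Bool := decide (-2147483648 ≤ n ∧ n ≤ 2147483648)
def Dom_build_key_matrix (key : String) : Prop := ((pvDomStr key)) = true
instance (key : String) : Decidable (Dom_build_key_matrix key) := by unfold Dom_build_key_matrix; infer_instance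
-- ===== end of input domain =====

-- B replaces A's cursor-and-sentinel cell-by-cell fill by gather-pad-slice: simpler decomposition, same values.


-- ===== PORT A =====
-- chr(n): exact for 0 ≤ n ≤ 0x10FFFF; the cursor stays in [65,127] on Dom inputs.
def pvChr (c : Int) : Char := Char.ofNat c.toNat

-- the 'while chr(char) in key: char += 1' loop; fuel 1000 is a pure termination guard
-- (on Dom inputs every key character has code ≤ 126, so the loop stops by code 127, well within the fuel).
def pvSkip (kd : List Char) : Nat → Int → Int
  | 0, ch => ch
  | n+1, ch => if pvChr ch ∈ kd then pvSkip kd n (ch + 1) else ch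

-- one inner-loop body: skip, then append a letter (and advance) or append None
def pvCellStep (kd : List Char) (st : Int × List (Option String)) : Int × List (Option String) :=
  let ch := pvSkip kd 1000 st.1
  if ch ≤ 90 then (ch + 1, st.2 ++ [some (String.ofList [pvChr ch])])
  else (ch, st.2 ++ [none])

def build_key_matrix (key : String) : (Int × Int) × List (List (Option String)) :=
  let kd : List Char := PySem.List.dedup key.toList        -- key = ''.join(dict.fromkeys(key))
  let m0 : List (List (Option String)) := [kd.map (fun ch => some (String.ofList [ch]))]   -- m = [split(key)]
  let cols : Int := (kd.length : Int)
  let rows : Int := Int.tdiv (26 - cols) cols + 1          -- int((26-cols)/cols): exact trunc-toward-zero at these magnitudes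
  let fin := (PySem.List.pyRange 0 rows 1).foldl (fun (st : Int × List (List (Option String))) _ =>
      let inner := (PySem.List.pyRange 0 cols 1).foldl (fun st2 _ => pvCellStep kd st2)
                     (st.1, ([] : List (Option String)))
      (inner.1, st.2 ++ [inner.2])) (65, m0)
  ((rows, cols), fin.2)

-- ===== PORT B =====
def build_key_matrix_alt (key : String) : (Int × Int) × List (List (Option String)) :=
  let kd : List Char := PySem.List.dedup key.toList        -- key = ''.join(dict.fromkeys(key))
  let cols : Int := (kd.length : Int)
  let rows : Int := Int.tdiv (26 - cols) cols + 1
  let total : Int := rows * cols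
  -- remaining = [chr(c) for c in range(65, 91) if chr(c) not in key]  (kept as Option cells, as padded mixes in None)
  let remaining : List (Option String) :=
    (PySem.List.pyRange 65 91 1).filterMap (fun c =>
      if pvChr c ∈ kd then none else some (some (String.ofList [pvChr c])))
  -- padded = remaining + [None] * (total - len(remaining))   ([None]*negative = [], as .toNat clamps)
  let padded := remaining ++ List.replicate (total - (remaining.length : Int)).toNat (none : Option String)
  let body := (PySem.List.pyRange 0 rows 1).map (fun i =>
      PySem.List.slice padded (some (i * cols)) (some ((i + 1) * cols)))
  ((rows, cols), (kd.map (fun ch => some (String.ofList [ch]))) :: body)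

-- ===== PRECONDITION & SPEC =====
-- Pre_ excludes only the empty key, on which Python A raises ZeroDivisionError (cols = 0).
def Pre_build_key_matrix (key : String) : Prop := key ≠ ""
instance (key : String) : Decidable (Pre_build_key_matrix key) := by unfold Pre_build_key_matrix; infer_instance
def pvWitness_build_key_matrix : String := "HACK"

def Spec_build_key_matrix (key : String) (out : (Int × Int) × List (List (Option String))) : Prop := out = build_key_matrix_alt key
instance (key : String) (out : (Int × Int) × List (List (Option String))) : Decidable (Spec_build_key_matrix key out) := by unfold Spec_build_key_matrix; infer_instance

-- ===== CLAIM (what is proved, stated in full; the proofs are below) =====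
def Claim_equal_build_key_matrix : Prop := ∀ (key : String), Dom_build_key_matrix key → Pre_build_key_matrix key → Spec_build_key_matrix key (build_key_matrix key)


-- ===== LEMMAS AND PROOFS =====

-- flat generation of A's cells: skip, then emit a letter (advancing) or a None
def pvGen (kd : List Char) : Nat → Int → Int × List (Option String)
  | 0, c => (c, [])
  | n+1, c =>
    let c' := pvSkip kd 1000 c
    if c' ≤ 90 then
      let r := pvGen kd n (c' + 1)
      (r.1, some (String.ofList [pvChr c']) :: r.2)
    else
      let r := pvGen kd n c'
      (r.1, none :: r.2)

-- A's outer loop: r rows of K cells each, threading the cursor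
def pvOuter (kd : List Char) (K : Nat) : Nat → Int → Int × List (List (Option String))
  | 0, c => (c, [])
  | r+1, c =>
    let g := pvGen kd K c
    let o := pvOuter kd K r g.1
    (o.1, g.2 :: o.2)

-- the letters still available from cursor position c (codes in [c, 90] not in kd), as cells
def pvAvail (kd : List Char) (c : Int) : List (Option String) :=
  (List.range' c.toNat (91 - c.toNat)).filterMap (fun x =>
    if Char.ofNat x ∈ kd then none else some (some (String.ofList [Char.ofNat x])))

def pvPadTake (n : Nat) (A : List (Option String)) : List (Option String) :=
  A.take n ++ List.replicate (n - A.length) none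

def pvChunks (K : Nat) : Nat → List (Option String) → List (List (Option String))
  | 0, _ => []
  | r+1, P => P.take K :: pvChunks K r (P.drop K)

def pvPadChunks (K : Nat) : Nat → List (Option String) → List (List (Option String))
  | 0, _ => []
  | r+1, A => pvPadTake K A :: pvPadChunks K r (A.drop K)

lemma pvAvail_eq_nil (kd : List Char) (c : Int) (h : 90 < c) : pvAvail kd c = [] := by
  unfold pvAvail
  have : 91 - c.toNat = 0 := by omega
  simp [this]

lemma pvAvail_cons (kd : List Char) (c : Int) (h65 : 65 ≤ c) (h90 : c ≤ 90)
    (hn : pvChr c ∉ kd) :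
    pvAvail kd c = some (String.ofList [pvChr c]) :: pvAvail kd (c + 1) := by
  unfold pvAvail
  have h1 : 91 - c.toNat = (91 - (c + 1).toNat) + 1 := by omega
  have h2 : (c + 1).toNat = c.toNat + 1 := by omega
  rw [h1, List.range'_succ, List.filterMap_cons, h2]
  have : Char.ofNat c.toNat ∉ kd := hn
  simp [this, pvChr]

lemma pvAvail_mem_step (kd : List Char) (c : Int) (h65 : 65 ≤ c) (hmem : pvChr c ∈ kd) :
    pvAvail kd c = pvAvail kd (c + 1) := by
  unfold pvAvail
  have h2 : (c + 1).toNat = c.toNat + 1 := by omega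
  by_cases h90 : c ≤ 90
  · have h1 : 91 - c.toNat = (91 - (c + 1).toNat) + 1 := by omega
    rw [h1, List.range'_succ, List.filterMap_cons, h2]
    have : Char.ofNat c.toNat ∈ kd := hmem
    simp [this]
  · have h1 : 91 - c.toNat = 0 := by omega
    have h3 : 91 - (c + 1).toNat = 0 := by omega
    simp [h1, h3]

lemma pvSkip_spec (kd : List Char) (hbd : ∀ ch ∈ kd, ch.toNat ≤ 126) :
    ∀ (fuel : Nat) (c : Int), 65 ≤ c → c ≤ 127 → 127 - c.toNat ≤ fuel →
      pvChr (pvSkip kd fuel c) ∉ kd ∧ c ≤ pvSkip kd fuel c ∧ pvSkip kd fuel c ≤ 127 ∧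
      pvAvail kd (pvSkip kd fuel c) = pvAvail kd c := by
  intro fuel
  induction fuel with
  | zero =>
    intro c h65 h127 hf
    have hc : c = 127 := by omega
    subst hc
    refine ⟨?_, le_refl _, le_refl _, rfl⟩
    show pvChr 127 ∉ kd
    intro hmem
    have := hbd _ hmem
    simp [pvChr] at this
  | succ n ih =>
    intro c h65 h127 hf
    by_cases hmem : pvChr c ∈ kd
    · have hle : c.toNat ≤ 126 := by
        have h := hbd _ hmem
        rw [pvChr, Char.toNat_ofNat] at h
        by_cases hv : Nat.isValidChar c.toNat
        · simpa [hv] using h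
        · exact absurd (Or.inl (by omega : c.toNat < 55296)) hv
      have h126 : c ≤ 126 := by omega
      have step : pvSkip kd (n+1) c = pvSkip kd n (c + 1) := by
        simp [pvSkip, hmem]
      rw [step]
      obtain ⟨a, b, d, e⟩ := ih (c + 1) (by omega) (by omega) (by omega)
      exact ⟨a, by omega, d, by rw [e, pvAvail_mem_step kd c h65 hmem]⟩
    · have step : pvSkip kd (n+1) c = c := by simp [pvSkip, hmem]
      rw [step]
      exact ⟨hmem, le_refl _, h127, rfl⟩

lemma pvPadTake_cons (n : Nat) (x : Option String) (A : List (Option String)) :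
    pvPadTake (n+1) (x :: A) = x :: pvPadTake n A := by
  simp [pvPadTake]

lemma pvPadTake_nil (n : Nat) : pvPadTake n [] = List.replicate n none := by
  simp [pvPadTake]

lemma pvGen_spec (kd : List Char) (hbd : ∀ ch ∈ kd, ch.toNat ≤ 126) :
    ∀ (n : Nat) (c : Int), 65 ≤ c → c ≤ 127 →
      65 ≤ (pvGen kd n c).1 ∧ (pvGen kd n c).1 ≤ 127 ∧
      (pvGen kd n c).2 = pvPadTake n (pvAvail kd c) ∧
      pvAvail kd ((pvGen kd n c).1) = (pvAvail kd c).drop n := by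
  intro n
  induction n with
  | zero =>
    intro c h65 h127
    exact ⟨h65, h127, by simp [pvGen, pvPadTake], by simp [pvGen]⟩
  | succ n ih =>
    intro c h65 h127
    obtain ⟨hnm, hge, hle, hav⟩ := pvSkip_spec kd hbd 1000 c h65 h127 (by omega)
    set c' := pvSkip kd 1000 c with hc'
    by_cases h90 : c' ≤ 90
    · have hg : pvGen kd (n+1) c = ((pvGen kd n (c'+1)).1,
          some (String.ofList [pvChr c']) :: (pvGen kd n (c'+1)).2) := by
        simp [pvGen, ← hc', h90]
      obtain ⟨a, b, d, e⟩ := ih (c'+1) (by omega) (by omega)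
      have hcons := pvAvail_cons kd c' (by omega) h90 hnm
      rw [hg]
      refine ⟨a, b, ?_, ?_⟩
      · simp only [d, ← hav, hcons, pvPadTake_cons]
      · simp only [e, ← hav, hcons, List.drop_succ_cons]
    · have hg : pvGen kd (n+1) c = ((pvGen kd n c').1, none :: (pvGen kd n c').2) := by
        simp [pvGen, ← hc', h90]
      obtain ⟨a, b, d, e⟩ := ih c' (by omega) hle
      have hnil : pvAvail kd c' = [] := pvAvail_eq_nil kd c' (by omega)
      have hnil' : pvAvail kd c = [] := by rw [← hav]; exact hnil
      rw [hg]
      refine ⟨a, b, ?_, ?_⟩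
      · simp [d, hnil, hnil', pvPadTake_nil, List.replicate_succ]
      · simp [e, hnil, hnil']

lemma inner_fold (kd : List Char) : ∀ (l : List Int) (c : Int) (row : List (Option String)),
    l.foldl (fun st2 _ => pvCellStep kd st2) (c, row)
      = ((pvGen kd l.length c).1, row ++ (pvGen kd l.length c).2) := by
  intro l
  induction l with
  | nil => intro c row; simp [pvGen]
  | cons x t ih =>
    intro c row
    rw [List.foldl_cons, List.length_cons]
    show (t.foldl (fun st2 _ => pvCellStep kd st2) (pvCellStep kd (c, row))) = _
    by_cases h90 : pvSkip kd 1000 c ≤ 90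
    · have hstep : pvCellStep kd (c, row)
          = (pvSkip kd 1000 c + 1, row ++ [some (String.ofList [pvChr (pvSkip kd 1000 c)])]) := by
        simp [pvCellStep, h90]
      rw [hstep, ih]
      simp [pvGen, h90]
    · have hstep : pvCellStep kd (c, row) = (pvSkip kd 1000 c, row ++ [none]) := by
        simp [pvCellStep, h90]
      rw [hstep, ih]
      simp [pvGen, h90]

lemma outer_fold (kd : List Char) (K : Nat) :
    ∀ (l : List Int) (c : Int) (m : List (List (Option String))),
    l.foldl (fun (st : Int × List (List (Option String))) _ =>
        let inner := (PySem.List.pyRange 0 (K : Int) 1).foldl (fun st2 _ => pvCellStep kd st2)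
                       (st.1, ([] : List (Option String)))
        (inner.1, st.2 ++ [inner.2])) (c, m)
      = ((pvOuter kd K l.length c).1, m ++ (pvOuter kd K l.length c).2) := by
  intro l
  induction l with
  | nil => intro c m; simp [pvOuter]
  | cons x t ih =>
    intro c m
    rw [List.foldl_cons, List.length_cons]
    have hlen : (PySem.List.pyRange 0 (K : Int) 1).length = K := by
      rw [PySem.List.length_pyRange_one]; simp
    rw [inner_fold kd _ c ([] : List (Option String)), hlen]
    rw [ih]
    simp [pvOuter]

lemma pvOuter_spec (kd : List Char) (hbd : ∀ ch ∈ kd, ch.toNat ≤ 126) (K : Nat) :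
    ∀ (r : Nat) (c : Int), 65 ≤ c → c ≤ 127 →
      (pvOuter kd K r c).2 = pvPadChunks K r (pvAvail kd c) := by
  intro r
  induction r with
  | zero => intro c _ _; simp [pvOuter, pvPadChunks]
  | succ r ih =>
    intro c h65 h127
    obtain ⟨a, b, d, e⟩ := pvGen_spec kd hbd K c h65 h127
    show ((pvGen kd K c).2 :: (pvOuter kd K r (pvGen kd K c).1).2) = _
    rw [d, ih _ a b, e]
    rfl

lemma chunks_map (K : Nat) : ∀ (r : Nat) (P : List (Option String)),
    (List.range r).map (fun k => (P.drop (k * K)).take K) = pvChunks K r P := by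
  intro r
  induction r with
  | zero => intro P; simp [pvChunks]
  | succ r ih =>
    intro P
    rw [List.range_succ_eq_map, List.map_cons, List.map_map]
    show (P.drop (0 * K)).take K :: _ = _
    have h2 : ((fun k => (P.drop (k * K)).take K) ∘ Nat.succ)
        = fun k => ((P.drop K).drop (k * K)).take K := by
      funext k
      simp only [Function.comp]
      rw [List.drop_drop]
      have hsm : k.succ * K = K + k * K := by rw [Nat.succ_mul]; omega
      rw [hsm]
    rw [h2, ih (P.drop K)]
    simp [pvChunks]

lemma body_slices (K : Nat) : ∀ (r : Nat) (P : List (Option String)),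
    (PySem.List.pyRange 0 (r : Nat) 1).map (fun i =>
        PySem.List.slice P (some (i * (K : Int))) (some ((i + 1) * (K : Int)))) = pvChunks K r P := by
  intro r P
  rw [PySem.List.pyRange_one, List.map_map]
  have hr : ((r : Int) - 0).toNat = r := by omega
  rw [hr, ← chunks_map K r P]
  apply List.map_congr_left
  intro k hk
  simp only [Function.comp, zero_add]
  have h1 : (k : Int) * (K : Int) = ((k * K : Nat) : Int) := by push_cast; ring
  have h2 : ((k : Int) + 1) * (K : Int) = ((k * K + K : Nat) : Int) := by push_cast; ring
  rw [h1, h2, PySem.List.slice_natCast]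
  congr 1
  omega

lemma chunks_pad (K : Nat) : ∀ (r : Nat) (A : List (Option String)),
    pvChunks K r (A ++ List.replicate (r * K - A.length) none) = pvPadChunks K r A := by
  intro r
  induction r with
  | zero => intro A; simp [pvChunks, pvPadChunks]
  | succ r ih =>
    intro A
    show (A ++ List.replicate ((r+1) * K - A.length) none).take K
        :: pvChunks K r ((A ++ List.replicate ((r+1) * K - A.length) none).drop K)
        = pvPadTake K A :: pvPadChunks K r (A.drop K)
    congr 1
    · rw [List.take_append, List.take_replicate]
      unfold pvPadTake
      congr 1
      congr 1
      have he : (r+1) * K = r * K + K := by ring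
      omega
    · rw [List.drop_append, List.drop_replicate]
      have : (r+1) * K - A.length - (K - A.length) = r * K - (A.drop K).length := by
        simp only [List.length_drop]
        have he : (r+1) * K = r * K + K := by ring
        omega
      rw [this, ih (A.drop K)]

lemma remaining_eq_avail (kd : List Char) :
    (PySem.List.pyRange 65 91 1).filterMap (fun c =>
      if pvChr c ∈ kd then none else some (some (String.ofList [pvChr c]))) = pvAvail kd 65 := by
  unfold pvAvail
  rw [PySem.List.pyRange_one]
  show _ = (List.range' 65 26).filterMap _
  rw [List.range'_eq_map_range, List.filterMap_map, List.filterMap_map]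
  apply List.filterMap_congr
  intro x hx
  have hc : pvChr (65 + (x : Int)) = Char.ofNat (65 + x) := by
    unfold pvChr
    congr 1
  show (if pvChr (65 + (x:Int)) ∈ kd then none else some (some (String.ofList [pvChr (65 + (x:Int))])))
      = (if Char.ofNat (65 + x) ∈ kd then none else some (some (String.ofList [Char.ofNat (65 + x)])))
  rw [hc]

-- ===== VERDICT (by name: the statement is the Claim_ definition above) =====
theorem build_key_matrix_spec : Claim_equal_build_key_matrix := by
  unfold Claim_equal_build_key_matrix
  intro key hdom hpre
  unfold Spec_build_key_matrix
  have hbd : ∀ ch ∈ PySem.List.dedup key.toList, ch.toNat ≤ 126 := by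
    intro ch hch
    rw [PySem.List.mem_dedup] at hch
    unfold Dom_build_key_matrix pvDomStr at hdom
    rw [List.all_eq_true] at hdom
    have := hdom ch hch
    unfold pvDomChar at this
    simp at this
    omega
  have hKpos : 0 < (PySem.List.dedup key.toList).length := by
    rcases h : PySem.List.dedup key.toList with _ | ⟨c, t⟩
    · exfalso
      have hnil : key.toList = [] := by
        by_contra hne
        rcases hkey : key.toList with _ | ⟨c, t2⟩
        · exact hne hkey
        · have hm : c ∈ PySem.List.dedup key.toList := by
            rw [PySem.List.mem_dedup, hkey]; exact List.mem_cons_self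
          rw [h] at hm
          simp at hm
      exact hpre (String.toList_eq_nil_iff.mp hnil)
    · simp
  unfold build_key_matrix build_key_matrix_alt
  simp only []
  generalize hq : PySem.List.dedup key.toList = kd at hbd hKpos ⊢
  set K := kd.length with hK
  have hrows0 : 0 ≤ Int.tdiv (26 - (K:Int)) (K:Int) := by
    by_cases h26 : (K:Int) ≤ 26
    · exact Int.tdiv_nonneg (by omega) (by omega)
    · have he : (26 - (K:Int)) = -((K:Int) - 26) := by ring
      rw [he, Int.neg_tdiv]
      have hz : ((K:Int) - 26).tdiv (K:Int) = 0 := Int.tdiv_eq_zero_of_lt (by omega) (by omega)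
      rw [hz]
      simp
  set rowsI : Int := Int.tdiv (26 - (K:Int)) (K:Int) + 1 with hrowsI
  set r := rowsI.toNat with hr
  have hcast : rowsI = (r : Int) := by omega
  congr 1
  rw [outer_fold kd K (PySem.List.pyRange 0 rowsI 1) 65
      [kd.map (fun ch => some (String.ofList [ch]))]]
  have hlenr : (PySem.List.pyRange 0 rowsI 1).length = r := by
    rw [PySem.List.length_pyRange_one]
    omega
  rw [hlenr, pvOuter_spec kd hbd K r 65 (by omega) (by omega), remaining_eq_avail kd]
  have hmul : (r : Int) * (K : Int) = ((r * K : Nat) : Int) := by push_cast; ring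
  have hM : (rowsI * (K:Int) - ((pvAvail kd 65).length : Int)).toNat
      = r * K - (pvAvail kd 65).length := by
    rw [hcast, hmul]
    omega
  rw [hM, hcast, body_slices K r, chunks_pad K r (pvAvail kd 65)]
  simp
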